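-- pv_equiv track=rewrite | github.com/manishbhatt/gsync | gsync/__main__.py | merge_task_dicts
-- ===== SOURCE A (Python) =====
-- def merge_task_dicts(
--     local_task_dict: dict[str, bool], google_task_dict: dict[str, bool]
-- ) -> dict[str, bool]:
--     merged_task_dict = local_task_dict.copy()
--     for title, completed in google_task_dict.items():
--         if (title not in merged_task_dict) or completed:
--             merged_task_dict[title] = completed
--     return merged_task_dict
-- ===== SOURCE B (Python) =====
-- def merge_task_dicts(
--     local_task_dict: dict[str, bool], google_task_dict: dict[str, bool]
-- ) -> dict[str, bool]:
--     merged_task_dict = {}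
--     for title, completed in local_task_dict.items():
--         merged_task_dict[title] = completed or google_task_dict.get(title, False)
--     for title, completed in google_task_dict.items():
--         if title not in local_task_dict:
--             merged_task_dict[title] = completed
--     return merged_task_dict
-- ===== Notes on version B (the rewrite author's own statement) =====
-- stated objective: alternative
-- what changed: Instead of copying local and then conditionally overwriting entries while iterating google's items, B builds a fresh dict in two staged append-only passes: first every local title with its completion flag lifted by google's, then google's titles absent from local; no entry is ever overwritten.
import Mathlib
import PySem

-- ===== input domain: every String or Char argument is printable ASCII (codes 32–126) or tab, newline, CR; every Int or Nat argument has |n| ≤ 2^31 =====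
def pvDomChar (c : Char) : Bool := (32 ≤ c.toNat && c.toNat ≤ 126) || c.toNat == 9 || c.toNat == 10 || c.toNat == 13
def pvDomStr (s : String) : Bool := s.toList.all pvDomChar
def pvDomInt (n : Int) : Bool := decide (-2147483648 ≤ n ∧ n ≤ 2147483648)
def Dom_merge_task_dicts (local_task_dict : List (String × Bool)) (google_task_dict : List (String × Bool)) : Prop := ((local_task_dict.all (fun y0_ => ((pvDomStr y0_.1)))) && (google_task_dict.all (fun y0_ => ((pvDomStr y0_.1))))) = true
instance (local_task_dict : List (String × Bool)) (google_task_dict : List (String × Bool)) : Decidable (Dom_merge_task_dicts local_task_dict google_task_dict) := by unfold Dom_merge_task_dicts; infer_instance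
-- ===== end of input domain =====

-- B builds a fresh dict in two staged append-only passes (all local titles with the flag
-- lifted by google's, then google's titles absent from local) instead of A's
-- copy-then-conditionally-overwrite loop over google's items (objective: alternative).
-- Equivalence is proved on assoc lists with duplicate-free keys (= real dicts).

-- exact ports of the Python dict primitives on assoc lists:
-- 'k in d'
def pyContains (d : List (String × Bool)) (k : String) : Bool := d.any (fun p => p.1 == k)
-- 'd.get(k, dflt)'
def pyGetD (d : List (String × Bool)) (k : String) (dflt : Bool) : Bool :=
  ((d.find? (fun p => p.1 == k)).map Prod.snd).getD dflt
-- 'd[k] = v' (overwrite in place, new keys append)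
def pySet (d : List (String × Bool)) (k : String) (v : Bool) : List (String × Bool) :=
  if pyContains d k then d.map (fun p => if p.1 == k then (k, v) else p) else d ++ [(k, v)]

-- ===== PORT A =====
def merge_task_dicts (local_task_dict : List (String × Bool)) (google_task_dict : List (String × Bool)) : List (String × Bool) :=
  google_task_dict.foldl
    (fun merged p => if !pyContains merged p.1 || p.2 then pySet merged p.1 p.2 else merged)
    local_task_dict

-- ===== PORT B =====
def merge_task_dicts_alt (local_task_dict : List (String × Bool)) (google_task_dict : List (String × Bool)) : List (String × Bool) :=
  -- pass 1: every local title, completion lifted by google's flag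
  let m1 := local_task_dict.foldl
    (fun d p => pySet d p.1 (p.2 || pyGetD google_task_dict p.1 false)) []
  -- pass 2: google's titles absent from local
  google_task_dict.foldl
    (fun d p => if !pyContains local_task_dict p.1 then pySet d p.1 p.2 else d) m1

-- ===== PRECONDITION & SPEC =====
-- Pre_ excludes association lists with duplicate keys: a Python dict can never contain them,
-- so such lists have no faithful dict reading (any behaviour on them is a representation artefact).
def Pre_merge_task_dicts (local_task_dict : List (String × Bool)) (google_task_dict : List (String × Bool)) : Prop :=
  (local_task_dict.map Prod.fst).Nodup ∧ (google_task_dict.map Prod.fst).Nodup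
instance (local_task_dict : List (String × Bool)) (google_task_dict : List (String × Bool)) : Decidable (Pre_merge_task_dicts local_task_dict google_task_dict) := by unfold Pre_merge_task_dicts; infer_instance

def pvWitness_merge_task_dicts : (List (String × Bool)) × (List (String × Bool)) :=
  ([("a", true), ("b", false)], [("b", true), ("c", false)])

def Spec_merge_task_dicts (local_task_dict : List (String × Bool)) (google_task_dict : List (String × Bool)) (out : List (String × Bool)) : Prop := out = merge_task_dicts_alt local_task_dict google_task_dict
instance (local_task_dict : List (String × Bool)) (google_task_dict : List (String × Bool)) (out : List (String × Bool)) : Decidable (Spec_merge_task_dicts local_task_dict google_task_dict out) := by unfold Spec_merge_task_dicts; infer_instance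

-- ===== CLAIM (what is proved, stated in full; the proofs are below) =====
def Claim_equal_merge_task_dicts : Prop := ∀ (local_task_dict : List (String × Bool)) (google_task_dict : List (String × Bool)), Dom_merge_task_dicts local_task_dict google_task_dict → Pre_merge_task_dicts local_task_dict google_task_dict → Spec_merge_task_dicts local_task_dict google_task_dict (merge_task_dicts local_task_dict google_task_dict)

-- ===== LEMMAS AND PROOFS =====

theorem pyContains_iff (d : List (String × Bool)) (k : String) :
    pyContains d k = true ↔ k ∈ d.map Prod.fst := by
  simp [pyContains, List.any_eq_true, List.mem_map]

theorem pyGetD_not_contains (d : List (String × Bool)) (k : String) (dflt : Bool)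
    (h : pyContains d k = false) : pyGetD d k dflt = dflt := by
  simp only [pyContains] at h
  have hf : d.find? (fun p => p.1 == k) = none := by
    rw [List.find?_eq_none]
    intro p hp
    simpa using List.any_eq_false.mp h p hp
  simp [pyGetD, hf]

theorem pyGetD_cons (t : String) (c : Bool) (g : List (String × Bool)) (s : String) (dflt : Bool) :
    pyGetD ((t, c) :: g) s dflt = if t == s then c else pyGetD g s dflt := by
  by_cases h : t = s
  · simp [pyGetD, List.find?, h]
  · have hb : (t == s) = false := by simpa using h
    simp [pyGetD, List.find?, hb]

theorem pyContains_not_mem (d : List (String × Bool)) (k : String)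
    (h : k ∉ d.map Prod.fst) : pyContains d k = false := by
  cases hc : pyContains d k
  · rfl
  · exact absurd ((pyContains_iff d k).mp hc) h

theorem pyContains_pySet_map (m : List (String × Bool)) (t : String) (c : Bool) (s : String) :
    pyContains (m.map (fun p => if p.1 == t then (t, c) else p)) s = pyContains m s := by
  induction m with
  | nil => rfl
  | cons q m ih =>
    simp only [pyContains] at ih
    simp only [pyContains, List.map_cons, List.any_cons, ih]
    by_cases hq : q.1 = t
    · simp [hq]
    · simp [hq]

theorem pyContains_append_single (m : List (String × Bool)) (t : String) (c : Bool) (s : String) :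
    pyContains (m ++ [(t, c)]) s = (pyContains m s || t == s) := by
  simp [pyContains, List.any_append]

-- characterisation of A's loop, for any accumulator m and duplicate-free google keys
theorem loopA_char (g : List (String × Bool)) :
    ∀ m : List (String × Bool), (g.map Prod.fst).Nodup →
      merge_task_dicts m g =
        m.map (fun p => (p.1, pyGetD g p.1 false || p.2)) ++
        g.filter (fun p => !pyContains m p.1) := by
  induction g with
  | nil =>
    intro m _
    simp [merge_task_dicts, pyGetD, List.find?]
  | cons hd g ih =>
    intro m hnd
    obtain ⟨t, c⟩ := hd
    simp only [List.map_cons, List.nodup_cons] at hnd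
    have htg : t ∉ g.map Prod.fst := hnd.1
    have hGg : ∀ dflt, pyGetD g t dflt = dflt := fun dflt =>
      pyGetD_not_contains _ _ _ (pyContains_not_mem _ _ htg)
    show List.foldl _ (if (!pyContains m t || c) = true then pySet m t c else m) g = _
    by_cases hc : pyContains m t = true
    · -- t already present
      cases c with
      | false =>
        have hstep : (if (!pyContains m t || false) = true then pySet m t false else m) = m := by
          simp [hc]
        rw [hstep]
        have hih := ih m hnd.2
        unfold merge_task_dicts at hih
        rw [hih]
        congr 1
        · apply List.map_congr_left
          intro p hp
          by_cases hpt : p.1 = t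
          · simp [pyGetD_cons, hpt, hGg]
          · have hb : (t == p.1) = false := by simpa using fun he => hpt he.symm
            simp [pyGetD_cons, hb]
        · simp [List.filter, hc]
      | true =>
        have hstep : (if (!pyContains m t || true) = true then pySet m t true else m)
            = m.map (fun p => if p.1 == t then (t, true) else p) := by
          simp [pySet, hc]
        rw [hstep]
        have hih := ih (m.map (fun p => if p.1 == t then (t, true) else p)) hnd.2
        unfold merge_task_dicts at hih
        rw [hih]
        congr 1
        · rw [List.map_map]
          apply List.map_congr_left
          intro p hp
          by_cases hpt : p.1 = t
          · have hb : (p.1 == t) = true := by simpa using hpt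
            simp [Function.comp, hpt, pyGetD_cons, hGg]
          · have hb : (p.1 == t) = false := by simpa using hpt
            have hb' : (t == p.1) = false := by simpa using fun he => hpt he.symm
            simp [Function.comp, hb, hb', pyGetD_cons]
        · have heq : (fun p : String × Bool => !pyContains (m.map (fun p => if p.1 == t then (t, true) else p)) p.1)
               = fun p => !pyContains m p.1 := by
            funext p; rw [pyContains_pySet_map]
          rw [heq]
          simp [List.filter, hc]
    · -- t fresh: append (t, c)
      have hc' : pyContains m t = false := by simpa using hc
      have hstep : (if (!pyContains m t || c) = true then pySet m t c else m)
          = m ++ [(t, c)] := by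
        simp [pySet, hc']
      rw [hstep]
      have hih := ih (m ++ [(t, c)]) hnd.2
      unfold merge_task_dicts at hih
      rw [hih]
      rw [List.map_append]
      have h1 : List.map (fun p => (p.1, pyGetD ((t, c) :: g) p.1 false || p.2)) m
              = List.map (fun p => (p.1, pyGetD g p.1 false || p.2)) m := by
        apply List.map_congr_left
        intro p hp
        by_cases hpt : p.1 = t
        · refine absurd ((pyContains_iff m t).mpr ?_) (by simp [hc'])
          rw [← hpt]; exact List.mem_map_of_mem hp
        · have hb' : (t == p.1) = false := by simpa using fun he => hpt he.symm
          simp [pyGetD_cons, hb']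
      have h2 : List.map (fun p : String × Bool => (p.1, pyGetD g p.1 false || p.2)) [(t, c)]
              = [(t, c)] := by simp [hGg]
      have h4 : g.filter (fun p => !pyContains (m ++ [(t, c)]) p.1)
              = g.filter (fun p => !pyContains m p.1) := by
        apply List.filter_congr
        intro p hp
        have hb' : (t == p.1) = false := by
          simpa using fun he => htg (by rw [he]; exact List.mem_map_of_mem hp)
        rw [pyContains_append_single, hb']
        simp
      rw [h2, h4, h1]
      simp [List.filter, hc']

-- B's pass 1 only ever appends: with duplicate-free keys disjoint from the accumulator it is a map
theorem pass1_char (f : String × Bool → Bool) (l : List (String × Bool)) :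
    ∀ acc : List (String × Bool), (l.map Prod.fst).Nodup →
      (∀ p ∈ l, pyContains acc p.1 = false) →
      l.foldl (fun d p => pySet d p.1 (f p)) acc = acc ++ l.map (fun p => (p.1, f p)) := by
  induction l with
  | nil => intro acc _ _; simp
  | cons hd l ih =>
    intro acc hnd hfresh
    obtain ⟨t, c⟩ := hd
    simp only [List.map_cons, List.nodup_cons] at hnd
    have hct : pyContains acc t = false := hfresh (t, c) (List.mem_cons_self ..)
    show List.foldl _ (pySet acc t (f (t, c))) l = _
    rw [pySet, if_neg (by simp [hct])]
    rw [ih (acc ++ [(t, f (t, c))]) hnd.2 ?_]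
    · simp
    · intro p hp
      rw [pyContains_append_single]
      have hb : (t == p.1) = false := by
        simpa using fun he => hnd.1 (by rw [he]; exact List.mem_map_of_mem hp)
      rw [hb, hfresh p (List.mem_cons_of_mem _ hp)]
      rfl

-- B's pass 2 appends exactly the google entries whose title is absent from local
theorem pass2_char (l g : List (String × Bool)) :
    ∀ acc : List (String × Bool), (g.map Prod.fst).Nodup →
      (∀ p ∈ g, pyContains l p.1 = false → pyContains acc p.1 = false) →
      g.foldl (fun d p => if !pyContains l p.1 then pySet d p.1 p.2 else d) acc =
        acc ++ g.filter (fun p => !pyContains l p.1) := by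
  induction g with
  | nil => intro acc _ _; simp
  | cons hd g ih =>
    intro acc hnd hfresh
    obtain ⟨t, c⟩ := hd
    simp only [List.map_cons, List.nodup_cons] at hnd
    by_cases hl : pyContains l t = true
    · show List.foldl _ (if (!pyContains l t) = true then pySet acc t c else acc) g = _
      rw [if_neg (by simp [hl])]
      rw [ih acc hnd.2 (fun p hp => hfresh p (List.mem_cons_of_mem _ hp))]
      simp [List.filter, hl]
    · have hl' : pyContains l t = false := by simpa using hl
      have hct : pyContains acc t = false := hfresh (t, c) (List.mem_cons_self ..) hl'
      show List.foldl _ (if (!pyContains l t) = true then pySet acc t c else acc) g = _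
      rw [if_pos (by simp [hl']), pySet, if_neg (by simp [hct])]
      rw [ih (acc ++ [(t, c)]) hnd.2 ?_]
      · simp [List.filter, hl']
      · intro p hp hpl
        rw [pyContains_append_single]
        have hb : (t == p.1) = false := by
          simpa using fun he => hnd.1 (by rw [he]; exact List.mem_map_of_mem hp)
        rw [hb, hfresh p (List.mem_cons_of_mem _ hp) hpl]
        rfl

-- ===== VERDICT (by name: the statement is the Claim_ definition above) =====
theorem merge_task_dicts_spec : Claim_equal_merge_task_dicts := by
  intro l g _ hpre
  obtain ⟨hl, hg⟩ := hpre
  unfold Spec_merge_task_dicts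
  rw [loopA_char g l hg]
  unfold merge_task_dicts_alt
  rw [pass1_char _ l [] hl (by intro p _; rfl)]
  rw [pass2_char l g _ hg ?_]
  · rw [List.nil_append]
    congr 1
    apply List.map_congr_left
    intro p _
    rw [Bool.or_comm]
  · intro p hp hpl
    apply pyContains_not_mem
    intro hmem
    rw [List.nil_append, List.map_map] at hmem
    have : p.1 ∈ l.map Prod.fst := by
      simpa [Function.comp] using hmem
    exact absurd ((pyContains_iff l p.1).mpr this) (by simp [hpl])
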